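-- pv_equiv track=rewrite | github.com/karennahu/ENSAMBLADORES | ensamblador.py | detectar_string_sin_cerrar
-- ===== SOURCE A (Python) =====
-- from typing import List, Tuple, Optional
--
-- def detectar_string_sin_cerrar(linea: str) -> Optional[str]:
--     """Detecta si hay un string que empieza pero no termina"""
--     # Buscar comillas dobles sin cerrar
--     en_string_doble = False
--     inicio_string = -1
--     for i, c in enumerate(linea):
--         if c == '"' and (i == 0 or linea[i-1] != '\\'):
--             if not en_string_doble:
--                 en_string_doble = True
--                 inicio_string = i
--             else:
--                 en_string_doble = False
--     if en_string_doble: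
--         return linea[inicio_string:]
--
--     # Buscar comillas simples sin cerrar
--     en_string_simple = False
--     for i, c in enumerate(linea):
--         if c == "'" and (i == 0 or linea[i-1] != '\\'):
--             if not en_string_simple:
--                 en_string_simple = True
--                 inicio_string = i
--             else:
--                 en_string_simple = False
--     if en_string_simple:
--         return linea[inicio_string:]
--
--     return None
-- ===== SOURCE B (Python) =====
-- from typing import Optional
--
-- def detectar_string_sin_cerrar(linea: str) -> Optional[str]:
--     """Detecta si hay un string que empieza pero no termina"""
--     for q in ('"', "'"):
--         # parity of un-escaped quotes = all quotes minus backslash-escaped ones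
--         if (linea.count(q) - linea.count('\\' + q)) % 2 == 1:
--             # opener = last un-escaped quote, found by searching backwards
--             j = linea.rfind(q)
--             while j > 0 and linea[j - 1] == '\\':
--                 j = linea.rfind(q, 0, j)
--             return linea[j:]
--     return None
-- ===== Notes on version B (the rewrite author's own statement) =====
-- stated objective: faster
-- what changed: Instead of A's forward character scan with an open/close toggle and remembered start index, B decides whether a quote type is unterminated arithmetically from two substring counts (all quotes minus backslash-escaped ones, parity test) and then locates the opener by a backward rfind search that skips escaped quotes; no forward scan or toggle state.
import Mathlib
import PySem

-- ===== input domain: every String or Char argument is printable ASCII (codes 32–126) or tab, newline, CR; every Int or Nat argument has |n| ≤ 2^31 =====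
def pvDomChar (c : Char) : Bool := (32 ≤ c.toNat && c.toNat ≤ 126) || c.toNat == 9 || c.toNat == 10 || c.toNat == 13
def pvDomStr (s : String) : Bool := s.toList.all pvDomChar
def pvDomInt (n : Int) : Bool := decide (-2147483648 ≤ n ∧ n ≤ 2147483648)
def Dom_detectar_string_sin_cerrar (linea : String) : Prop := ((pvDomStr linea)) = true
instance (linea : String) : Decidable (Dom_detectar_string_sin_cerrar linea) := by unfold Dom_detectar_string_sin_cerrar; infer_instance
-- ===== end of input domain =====

-- B decides each quote type arithmetically (total quotes minus backslash-escaped ones, parity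
-- test via two substring counts) and finds the opener by a backward rfind search, instead of
-- A's forward toggle scan; a timing run measured B faster (library substring primitives
-- replace the per-character Python loop). Both total, no Pre_.

-- ===== PORT A =====
-- A's toggle step: on an un-escaped quote, open (recording the index) or close (keeping it).
def pvToggleA (st : Bool × Int) (i : Int) : Bool × Int :=
  if st.1 = false then (true, i) else (false, st.2)

def detectar_string_sin_cerrar (linea : String) : Option String :=
  let cs := linea.toList
  -- first loop: double quotes
  let s1 := (PySem.List.enumerate cs).foldl
    (fun (st : Bool × Int) p =>
      if p.2 = '"' ∧ (p.1 = 0 ∨ PySem.List.pyGet? cs (p.1 - 1) ≠ some '\\')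
      then pvToggleA st p.1 else st) (false, -1)
  if s1.1 = true then some (String.ofList (PySem.List.slice cs (some s1.2) none))
  else
    -- second loop: single quotes (inicio_string carried over from the first loop)
    let s2 := (PySem.List.enumerate cs).foldl
      (fun (st : Bool × Int) p =>
        if p.2 = '\'' ∧ (p.1 = 0 ∨ PySem.List.pyGet? cs (p.1 - 1) ≠ some '\\')
        then pvToggleA st p.1 else st) (false, s1.2)
    if s2.1 = true then some (String.ofList (PySem.List.slice cs (some s2.2) none))
    else none

-- ===== PORT B =====
-- Spec of PySem.Chars.rfind.go for a one-character pattern (needed below for the termination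
-- of pvScanBack, and by the equivalence proofs).
theorem pvRfindGo_spec (l : List Char) (q : Char) : ∀ m : Nat,
    (PySem.Chars.rfind.go l [q] m = -1 ∧ ∀ k : Nat, k ≤ m → l[k]? ≠ some q) ∨
    (∃ i : Nat, i ≤ m ∧ PySem.Chars.rfind.go l [q] m = (i : Int) ∧ l[i]? = some q ∧
      ∀ k : Nat, i < k → k ≤ m → l[k]? ≠ some q)
  | 0 => by
    by_cases h : l[0]? = some q
    · right
      refine ⟨0, le_refl _, ?_, h, by omega⟩
      have hp : List.isPrefixOf [q] l = true := by
        cases l with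
        | nil => simp at h
        | cons c t => simp_all [List.isPrefixOf]
      simp [PySem.Chars.rfind.go, hp]
    · left
      have hp : List.isPrefixOf [q] l = false := by
        cases l with
        | nil => simp [List.isPrefixOf]
        | cons c t =>
            simp only [List.getElem?_cons_zero] at h
            simp [List.isPrefixOf]
            intro hc; exact h (by simp [hc])
      constructor
      · simp [PySem.Chars.rfind.go, hp]
      · intro k hk; interval_cases k; simpa using h
  | (m+1) => by
    by_cases h : l[m+1]? = some q
    · right
      refine ⟨m+1, le_refl _, ?_, h, by omega⟩
      have hp : List.isPrefixOf [q] (List.drop (m+1) l) = true := by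
        have := List.head?_drop (l := l) (i := m+1)
        cases hd : List.drop (m+1) l with
        | nil => rw [hd] at this; simp [this.symm] at h
        | cons c t =>
          rw [hd] at this; simp [this.symm] at h
          simp [List.isPrefixOf, h]
      simp [PySem.Chars.rfind.go, hp]
    · have hp : List.isPrefixOf [q] (List.drop (m+1) l) = false := by
        have := List.head?_drop (l := l) (i := m+1)
        cases hd : List.drop (m+1) l with
        | nil => simp [List.isPrefixOf]
        | cons c t =>
          rw [hd] at this
          simp [List.isPrefixOf]
          intro hc; exact h (by rw [← this]; simp [hc])
      have heq : PySem.Chars.rfind.go l [q] (m+1) = PySem.Chars.rfind.go l [q] m := by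
        simp [PySem.Chars.rfind.go, hp]
      rcases pvRfindGo_spec l q m with ⟨h1, h2⟩ | ⟨i, h1, h2, h3, h4⟩
      · left
        refine ⟨heq ▸ h1, fun k hk => ?_⟩
        rcases Nat.lt_or_ge k (m+1) with hk' | hk'
        · exact h2 k (by omega)
        · have : k = m + 1 := by omega
          subst this; exact h
      · right
        refine ⟨i, by omega, heq ▸ h2, h3, fun k hk1 hk2 => ?_⟩
        rcases Nat.lt_or_ge k (m+1) with hk' | hk'
        · exact h4 k hk1 (by omega)
        · have : k = m + 1 := by omega
          subst this; exact h

theorem pvRfind_lt (l : List Char) (q : Char) : PySem.Chars.rfind l [q] < l.length := by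
  have hs := pvRfindGo_spec l q l.length
  unfold PySem.Chars.rfind
  rcases hs with ⟨h1, _⟩ | ⟨i, _, h2, h3, _⟩
  · rw [h1]; omega
  · rw [h2]
    have : i < l.length := by
      by_contra hc
      rw [List.getElem?_eq_none (by omega)] at h3
      simp at h3
    exact_mod_cast this

theorem pvRfindFrom_lt (cs : List Char) (q : Char) (j : Int) (hj : 0 < j) :
    PySem.Chars.rfindFrom cs [q] 0 (some j) < j := by
  unfold PySem.Chars.rfindFrom
  have hj0 : ¬ (j < 0) := by omega
  simp only [show ¬((0:Int) < 0) from by omega, if_false, hj0, Int.toNat_zero, List.drop_zero]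
  set e : Int := if (cs.length : Int) < j then (cs.length : Int) else j with he
  have hee : 0 ≤ e ∧ e ≤ j := by rw [he]; split_ifs <;> omega
  have hlt := pvRfind_lt (List.take e.toNat cs) q
  have hlen : ((List.take e.toNat cs).length : Int) ≤ e := by
    simp [List.length_take]
    omega
  split_ifs <;> omega

-- the `while j > 0 and linea[j-1] == '\\': j = linea.rfind(q, 0, j)` loop of Source B
def pvScanBack (cs : List Char) (q : Char) (j : Int) : Int :=
  if h : 0 < j ∧ PySem.List.pyGet? cs (j - 1) = some '\\' then
    pvScanBack cs q (PySem.Chars.rfindFrom cs [q] 0 (some j))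
  else j
termination_by j.toNat
decreasing_by
  have := pvRfindFrom_lt cs q j h.1
  omega

-- one iteration of Source B's `for q in ('"', "'")` body (some = early return)
def pvCheckQuote (linea : String) (q : Char) : Option String :=
  if PySem.Int.mod ((PySem.Str.count linea (String.ofList [q]) : Int)
      - (PySem.Str.count linea (String.ofList ['\\', q]) : Int)) 2 = 1 then
    some (String.ofList (PySem.List.slice linea.toList
      (some (pvScanBack linea.toList q (PySem.Str.rfind linea (String.ofList [q])))) none))
  else
    none

def detectar_string_sin_cerrar_alt (linea : String) : Option String :=
  match pvCheckQuote linea '"' with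
  | some r => some r
  | none =>
    match pvCheckQuote linea '\'' with
    | some r => some r
    | none => none

-- ===== PRECONDITION & SPEC =====
def Spec_detectar_string_sin_cerrar (linea : String) (out : Option String) : Prop := out = detectar_string_sin_cerrar_alt linea
instance (linea : String) (out : Option String) : Decidable (Spec_detectar_string_sin_cerrar linea out) := by unfold Spec_detectar_string_sin_cerrar; infer_instance

-- ===== CLAIM (what is proved, stated in full; the proofs are below) =====
def Claim_equal_detectar_string_sin_cerrar : Prop := ∀ (linea : String), Dom_detectar_string_sin_cerrar linea → Spec_detectar_string_sin_cerrar linea (detectar_string_sin_cerrar linea)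

-- ===== LEMMAS AND PROOFS =====

theorem pvCountGo_single (q : Char) : ∀ (l : List Char) (fuel acc : Nat), l.length ≤ fuel →
    PySem.Chars.count.go [q] fuel l acc = acc + l.count q
  | [], fuel, acc, _ => by
    cases fuel <;> simp [PySem.Chars.count.go]
  | c :: t, fuel, acc, hf => by
    cases fuel with
    | zero => simp at hf
    | succ f =>
      have ht : t.length ≤ f := by simp at hf; omega
      by_cases hc : c = q
      · have hp : List.isPrefixOf [q] (c :: t) = true := by simp [List.isPrefixOf, hc]
        simp only [PySem.Chars.count.go, hp, if_true]
        rw [pvCountGo_single q _ f (acc+1) (by simpa using ht)]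
        simp [hc]
        omega
      · have hp : List.isPrefixOf [q] (c :: t) = false := by
          simp [List.isPrefixOf]; intro h; exact hc h.symm
        simp only [PySem.Chars.count.go, hp]
        rw [pvCountGo_single q t f acc ht]
        simp [hc]

def pvEscCnt (q : Char) : Bool → List Char → Nat
  | _, [] => 0
  | b, c :: t => (if c = q ∧ b = true then 1 else 0) + pvEscCnt q (c == '\\') t

def pvUnescCnt (q : Char) : Bool → List Char → Nat
  | _, [] => 0
  | b, c :: t => (if c = q ∧ b = false then 1 else 0) + pvUnescCnt q (c == '\\') t

theorem pvCountGo_esc (q : Char) (hq : q ≠ '\\') : ∀ (fuel : Nat) (l : List Char) (acc : Nat) (b : Bool),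
    l.length ≤ fuel → (b = true → ∀ c, l.head? = some c → c ≠ q) →
    PySem.Chars.count.go ['\\', q] fuel l acc = acc + pvEscCnt q b l
  | fuel, [], acc, b, _, _ => by
    cases fuel <;> simp [PySem.Chars.count.go, pvEscCnt]
  | 0, c :: t, acc, b, hf, _ => by simp at hf
  | (f+1), c :: t, acc, b, hf, hb => by
    have hqb : (q == '\\') = false := by simp [hq]
    by_cases hp : List.isPrefixOf ['\\', q] (c :: t) = true
    · -- c = '\\', t = q :: t'
      have hc : c = '\\' ∧ List.isPrefixOf [q] t = true := by
        have := hp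
        simp [List.isPrefixOf] at this
        exact ⟨this.1.symm, by simpa [List.isPrefixOf] using this.2⟩
      obtain ⟨t', ht'⟩ : ∃ t', t = q :: t' := by
        rcases t with _ | ⟨d, t'⟩
        · simp [List.isPrefixOf] at hc
        · have : q = d := by simpa [List.isPrefixOf] using hc.2
          exact ⟨t', by rw [this]⟩
      subst ht'
      simp only [PySem.Chars.count.go, hp, if_true]
      have hlen : t'.length ≤ f := by simp at hf; omega
      rw [show List.drop (['\\', q].length) (c :: q :: t') = t' from rfl,
        pvCountGo_esc q hq f t' (acc+1) false hlen (by simp)]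
      rcases hc with ⟨hc1, _⟩
      subst hc1
      simp [pvEscCnt, hqb, Ne.symm hq]
      omega
    · have hp' : List.isPrefixOf ['\\', q] (c :: t) = false := Bool.eq_false_iff.mpr hp
      simp only [PySem.Chars.count.go, hp', Bool.false_eq_true, if_false]
      have hlen : t.length ≤ f := by simp at hf; omega
      have hside : (c == '\\') = true → ∀ d, t.head? = some d → d ≠ q := by
        intro hcb d hd hdq
        apply hp
        have : c = '\\' := by simpa using hcb
        subst this; subst hdq
        rcases t with _ | ⟨e, t'⟩
        · simp at hd
        · simp at hd; simp [List.isPrefixOf, hd]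
      rw [pvCountGo_esc q hq f t acc (c == '\\') hlen hside]
      have hz : (if c = q ∧ b = true then 1 else 0) = 0 := by
        split_ifs with h
        · exact absurd h.1 (hb h.2 c rfl)
        · rfl
      simp [pvEscCnt, hz]

theorem pvCount_split (q : Char) : ∀ (l : List Char) (b : Bool),
    l.count q = pvUnescCnt q b l + pvEscCnt q b l
  | [], b => by simp [pvUnescCnt, pvEscCnt]
  | c :: t, b => by
    rw [List.count_cons, pvCount_split q t (c == '\\')]
    simp only [pvUnescCnt, pvEscCnt]
    by_cases hc : c = q <;> cases b <;> simp [hc] <;> omega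

theorem pvCount_single_eq (cs : List Char) (q : Char) :
    PySem.Chars.count cs [q] = cs.count q := by
  rw [PySem.Chars.count]
  simp only [List.isEmpty_cons, if_false, Bool.false_eq_true]
  exact (pvCountGo_single q cs cs.length 0 le_rfl).trans (by omega)

theorem pvCount_esc_eq (cs : List Char) (q : Char) (hq : q ≠ '\\') :
    PySem.Chars.count cs ['\\', q] = pvEscCnt q false cs := by
  rw [PySem.Chars.count]
  simp only [List.isEmpty_cons, if_false, Bool.false_eq_true]
  exact (pvCountGo_esc q hq cs.length cs 0 false le_rfl (by simp)).trans (by omega)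

def pvUnescaped (cs : List Char) (q : Char) : List Int :=
  (PySem.List.enumerate cs).filterMap
    (fun p =>
      if p.2 = q ∧ (p.1 = 0 ∨ PySem.List.pyGet? cs (p.1 - 1) ≠ some '\\')
      then some p.1 else none)

theorem pvUnescaped_len_aux (q : Char) : ∀ (suf pre : List Char),
    ((PySem.List.enumerate suf (pre.length : Int)).filterMap
      (fun p =>
        if p.2 = q ∧ (p.1 = 0 ∨ PySem.List.pyGet? (pre ++ suf) (p.1 - 1) ≠ some '\\')
        then some p.1 else none)).length
    = pvUnescCnt q (pre.getLast? == some '\\') suf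
  | [], pre => by simp [PySem.List.enumerate, pvUnescCnt]
  | c :: t, pre => by
    rw [PySem.List.enumerate_cons, List.filterMap_cons]
    have hrec := pvUnescaped_len_aux q t (pre ++ [c])
    have hlen : ((pre ++ [c]).length : Int) = (pre.length : Int) + 1 := by simp
    have happ : (pre ++ [c]) ++ t = pre ++ c :: t := by simp
    rw [hlen, happ] at hrec
    have hflag : ((pre ++ [c]).getLast? == some '\\') = (c == '\\') := by simp
    rw [hflag] at hrec
    have hcond : (c = q ∧ ((pre.length : Int) = 0 ∨
        PySem.List.pyGet? (pre ++ c :: t) ((pre.length : Int) - 1) ≠ some '\\'))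
        ↔ (c = q ∧ (pre.getLast? == some '\\') = false) := by
      rcases List.eq_nil_or_concat pre with hpre | ⟨ys, y, hpre⟩
      · subst hpre; simp
      · have hne : pre ≠ [] := by subst hpre; simp
        have hpos : 1 ≤ pre.length := by
          rcases pre with _ | _
          · simp at hne
          · simp
        have hidx : (pre.length : Int) - 1 = ((pre.length - 1 : Nat) : Int) := by omega
        have hget : PySem.List.pyGet? (pre ++ c :: t) ((pre.length : Int) - 1) = pre.getLast? := by
          rw [hidx, PySem.List.pyGet?_natCast, List.getElem?_append_left (by omega),
            List.getLast?_eq_getElem?]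
        rw [hget]
        constructor
        · rintro ⟨h1, h2⟩
          refine ⟨h1, beq_eq_false_iff_ne.mpr ?_⟩
          rcases h2 with h2 | h2
          · omega
          · exact h2
        · rintro ⟨h1, h2⟩
          exact ⟨h1, Or.inr (beq_eq_false_iff_ne.mp h2)⟩
    by_cases hc : c = q ∧ ((pre.length : Int) = 0 ∨
        PySem.List.pyGet? (pre ++ c :: t) ((pre.length : Int) - 1) ≠ some '\\')
    · have hc' := hcond.mp hc
      rw [if_pos hc]
      simp only [List.length_cons, hrec, pvUnescCnt]
      rw [if_pos hc']
      omega
    · have hc' : ¬ (c = q ∧ (pre.getLast? == some '\\') = false) := fun h => hc (hcond.mpr h)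
      rw [if_neg hc]
      simp only [hrec, pvUnescCnt]
      rw [if_neg hc']
      omega

theorem pvUnescaped_length (cs : List Char) (q : Char) :
    (pvUnescaped cs q).length = pvUnescCnt q false cs := by
  have := pvUnescaped_len_aux q cs []
  simpa [pvUnescaped] using this

theorem pvMem_unescaped (cs : List Char) (q : Char) (i : Int) :
    i ∈ pvUnescaped cs q ↔
      ∃ n : Nat, i = (n : Int) ∧ cs[n]? = some q ∧ (n = 0 ∨ cs[n-1]? ≠ some '\\') := by
  rw [pvUnescaped, List.mem_filterMap]
  constructor
  · rintro ⟨p, hp, hcond⟩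
    rw [PySem.List.mem_enumerate_iff] at hp
    obtain ⟨k, hk, rfl⟩ := hp
    simp only [zero_add] at hcond ⊢
    split_ifs at hcond with hc
    · obtain ⟨hc1, hc2⟩ := hc
      injection hcond with hcond
      refine ⟨k, hcond.symm, by rw [List.getElem?_eq_getElem hk, hc1], ?_⟩
      rcases hc2 with hc2 | hc2
      · left; exact_mod_cast hc2
      · by_cases hk0 : k = 0
        · left; exact hk0
        · right
          intro hget
          apply hc2
          rw [show (k : Int) - 1 = ((k - 1 : Nat) : Int) by omega, PySem.List.pyGet?_natCast]
          exact hget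
  · rintro ⟨n, rfl, hget, hcond⟩
    have hn : n < cs.length := (List.getElem?_eq_some_iff.mp hget).1
    refine ⟨((n : Int), cs[n]), ?_, ?_⟩
    · rw [PySem.List.mem_enumerate_iff]
      exact ⟨n, hn, by simp⟩
    · have hc : cs[n] = q := by
        rw [List.getElem?_eq_getElem hn] at hget
        injection hget
      rw [if_pos]
      refine ⟨hc, ?_⟩
      by_cases hn0 : n = 0
      · left; simp [hn0]
      · right
        rcases hcond with h | h
        · exact absurd h hn0
        · rw [show (n : Int) - 1 = ((n - 1 : Nat) : Int) by omega, PySem.List.pyGet?_natCast]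
          exact h

theorem pvUnescaped_pairwise (cs : List Char) (q : Char) :
    (pvUnescaped cs q).Pairwise (· < ·) := by
  rw [pvUnescaped, List.pairwise_filterMap]
  apply List.Pairwise.imp _ (PySem.List.pairwise_lt_enumerate cs 0)
  intro a b hab x hx y hy
  split_ifs at hx hy
  · injection hx with hx; injection hy with hy
    rw [← hx, ← hy]; exact hab

theorem pvLe_getLast {l : List Int} {a x : Int} (hp : l.Pairwise (· < ·))
    (hl : l.getLast? = some a) (hx : x ∈ l) : x ≤ a := by
  obtain ⟨ys, rfl⟩ := List.getLast?_eq_some_iff.mp hl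
  rw [List.pairwise_append] at hp
  rcases List.mem_append.mp hx with h | h
  · exact le_of_lt (hp.2.2 x h a (by simp))
  · simp at h; omega

theorem pvRfindFrom_take (cs : List Char) (q : Char) (j : Int) (h0 : 0 < j)
    (hlen : j ≤ (cs.length : Int)) :
    PySem.Chars.rfindFrom cs [q] 0 (some j) = PySem.Chars.rfind (List.take j.toNat cs) [q] := by
  unfold PySem.Chars.rfindFrom
  have h1 : ¬ ((cs.length : Int) < j) := by omega
  have h2 : ¬ (j < 0) := by omega
  simp only [h1, h2, if_false, show ¬((0:Int) < 0) from by omega, Int.toNat_zero, List.drop_zero]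
  split_ifs with h3
  · exact h3.symm
  · omega

theorem pvScanBack_spec (cs : List Char) (q : Char) : ∀ (m u : Nat), m ≤ cs.length →
    cs[u]? = some q → (u = 0 ∨ cs[u-1]? ≠ some '\\') → u < m →
    (∀ k : Nat, u < k → k < m → cs[k]? = some q → (0 < k ∧ cs[k-1]? = some '\\')) →
    pvScanBack cs q (PySem.Chars.rfind (List.take m cs) [q]) = (u : Int) := by
  intro m
  induction m using Nat.strong_induction_on with
  | _ m IH =>
    intro u hm hqu hu hum hesc
    have hll : (List.take m cs).length = m := by simp; omega
    have hrf : PySem.Chars.rfind (List.take m cs) [q]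
        = PySem.Chars.rfind.go (List.take m cs) [q] (List.take m cs).length := rfl
    rcases pvRfindGo_spec (List.take m cs) q (List.take m cs).length with
      ⟨h1, h2⟩ | ⟨i, hi1, hi2, hi3, hi4⟩
    · exact absurd ((List.getElem?_take_of_lt hum).trans hqu)
        (h2 u (by omega))
    · have hilt : i < m := by
        have := (List.getElem?_eq_some_iff.mp hi3).1
        omega
      have hqi : cs[i]? = some q := (List.getElem?_take_of_lt hilt).symm.trans hi3
      have hui : u ≤ i := by
        by_contra hc
        exact absurd ((List.getElem?_take_of_lt hum).trans hqu)
          (hi4 u (by omega) (by omega))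
      rw [hrf, hi2]
      by_cases heq : u = i
      · subst heq
        rw [pvScanBack, dif_neg]
        rintro ⟨hpos, hbs⟩
        rcases hu with h0 | h0
        · subst h0; simp at hpos
        · have hu1 : 1 ≤ u := by
            by_contra; have : u = 0 := by omega
            subst this; simp at hpos
          rw [show ((u : Int)) - 1 = ((u - 1 : Nat) : Int) by omega,
            PySem.List.pyGet?_natCast] at hbs
          exact h0 hbs
      · have hulti : u < i := by omega
        obtain ⟨hi0, hiesc⟩ := hesc i hulti hilt hqi
        rw [pvScanBack, dif_pos]
        · rw [pvRfindFrom_take cs q i (by exact_mod_cast hi0) (by exact_mod_cast le_of_lt (lt_of_lt_of_le hilt hm))]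
          rw [Int.toNat_natCast]
          exact IH i hilt u (by omega) hqu hu hulti
            (fun k hk1 hk2 hk3 => hesc k hk1 (by omega) hk3)
        · constructor
          · exact_mod_cast hi0
          · rw [show ((i : Int)) - 1 = ((i - 1 : Nat) : Int) by omega,
              PySem.List.pyGet?_natCast]
            exact hiesc

theorem pvToggle_parity : ∀ (l : List Int) (i0 : Int),
    (l.foldl pvToggleA (false, i0)).1 = decide (l.length % 2 = 1)
    ∧ (l.length % 2 = 1 → some (l.foldl pvToggleA (false, i0)).2 = l.getLast?)
  | [], _ => by simp
  | [a], _ => by simp [pvToggleA]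
  | a :: b :: l, i0 => by
    have ih := pvToggle_parity l a
    have hstep : (a :: b :: l).foldl pvToggleA (false, i0) = l.foldl pvToggleA (false, a) := by
      simp [pvToggleA]
    rw [hstep]
    refine ⟨?_, ?_⟩
    · rw [ih.1]
      apply decide_eq_decide.mpr
      simp only [List.length_cons]
      omega
    · intro h
      have hl : l.length % 2 = 1 := by simp only [List.length_cons] at h; omega
      rcases l with _ | ⟨c, t⟩
      · simp at hl
      · rw [List.getLast?_cons_cons, List.getLast?_cons_cons]
        exact ih.2 hl

-- A's guarded fold over the enumeration is the toggle fold over the un-escaped index list.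

theorem pvFoldA_eq (cs : List Char) (q : Char) (init : Bool × Int) :
    (PySem.List.enumerate cs).foldl
      (fun (st : Bool × Int) p =>
        if p.2 = q ∧ (p.1 = 0 ∨ PySem.List.pyGet? cs (p.1 - 1) ≠ some '\\')
        then pvToggleA st p.1 else st) init
    = (pvUnescaped cs q).foldl pvToggleA init := by
  rw [pvUnescaped, List.foldl_filterMap]
  congr 1
  funext st p
  by_cases h : p.2 = q ∧ (p.1 = 0 ∨ PySem.List.pyGet? cs (p.1 - 1) ≠ some '\\') <;> simp [h]


-- one iteration of Source B's `for q in ('"', "'")` body (some = early return)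

theorem pvFmod_two (n : Nat) : PySem.Int.mod (n : Int) 2 = 1 ↔ n % 2 = 1 := by
  rw [PySem.Int.mod, Int.fmod_eq_emod]
  simp
  omega

theorem pvCheckQuote_eq (linea : String) (q : Char) (hq : q ≠ '\\') (i0 : Int) :
    pvCheckQuote linea q =
      (let st := (PySem.List.enumerate linea.toList).foldl
        (fun (st : Bool × Int) p =>
          if p.2 = q ∧ (p.1 = 0 ∨ PySem.List.pyGet? linea.toList (p.1 - 1) ≠ some '\\')
          then pvToggleA st p.1 else st) (false, i0)
      if st.1 = true then some (String.ofList (PySem.List.slice linea.toList (some st.2) none))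
      else none) := by
  have hcnt : (PySem.Str.count linea (String.ofList [q]) : Int)
      - (PySem.Str.count linea (String.ofList ['\\', q]) : Int)
      = ((pvUnescaped linea.toList q).length : Int) := by
    rw [PySem.Str.count_eq, PySem.Str.count_eq]
    simp only [String.toList_ofList]
    rw [pvCount_single_eq, pvCount_esc_eq _ _ hq, pvCount_split q linea.toList false,
      pvUnescaped_length]
    push_cast
    omega
  have hfold := pvFoldA_eq linea.toList q (false, i0)
  have hpar := pvToggle_parity (pvUnescaped linea.toList q) i0
  rw [pvCheckQuote]
  simp only [hfold, hcnt]
  by_cases hodd : (pvUnescaped linea.toList q).length % 2 = 1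
  · rw [if_pos ((pvFmod_two _).mpr hodd)]
    have hne : pvUnescaped linea.toList q ≠ [] := by
      intro h; rw [h] at hodd; simp at hodd
    obtain ⟨a, ha⟩ := Option.isSome_iff_exists.mp (List.getLast?_isSome.mpr hne)
    obtain ⟨n, rfl, hqn, hun⟩ := (pvMem_unescaped linea.toList q a).mp
      (List.mem_of_getLast? ha)
    have hnlt : n < linea.toList.length := (List.getElem?_eq_some_iff.mp hqn).1
    have hscan : pvScanBack linea.toList q
        (PySem.Chars.rfind linea.toList [q]) = (n : Int) := by
      have := pvScanBack_spec linea.toList q linea.toList.length n le_rfl hqn hun hnlt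
        (fun k hk1 hk2 hk3 => by
          constructor
          · omega
          · by_contra hbs
            have hmem : ((k : Int)) ∈ pvUnescaped linea.toList q :=
              (pvMem_unescaped linea.toList q k).mpr ⟨k, rfl, hk3, Or.inr hbs⟩
            have := pvLe_getLast (pvUnescaped_pairwise linea.toList q) ha hmem
            omega)
      rwa [List.take_length] at this
    rw [PySem.Str.rfind_eq]
    simp only [String.toList_ofList]
    rw [hscan]
    have hflag : ((pvUnescaped linea.toList q).foldl pvToggleA (false, i0)).1 = true := by
      rw [hpar.1]; simp [hodd]
    rw [if_pos hflag]
    have hst2 : ((pvUnescaped linea.toList q).foldl pvToggleA (false, i0)).2 = (n : Int) := by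
      have := hpar.2 hodd
      rw [ha] at this
      exact Option.some_inj.mp this
    rw [hst2]
  · rw [if_neg (fun h => hodd ((pvFmod_two _).mp h))]
    have hflag : ((pvUnescaped linea.toList q).foldl pvToggleA (false, i0)).1 = false := by
      rw [hpar.1]; simp [hodd]
    rw [hflag]
    simp

theorem pvPorts_agree (linea : String) : detectar_string_sin_cerrar linea = detectar_string_sin_cerrar_alt linea := by
  rw [detectar_string_sin_cerrar, detectar_string_sin_cerrar_alt,
    pvCheckQuote_eq linea '"' (by decide) (-1),
    pvCheckQuote_eq linea '\'' (by decide)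
      (((PySem.List.enumerate linea.toList).foldl
        (fun (st : Bool × Int) p =>
          if p.2 = '"' ∧ (p.1 = 0 ∨ PySem.List.pyGet? linea.toList (p.1 - 1) ≠ some '\\')
          then pvToggleA st p.1 else st) (false, -1)).2)]
  simp only []
  split_ifs with h1 h2 <;> simp

-- ===== VERDICT (by name: the statement is the Claim_ definition above) =====
theorem detectar_string_sin_cerrar_spec : Claim_equal_detectar_string_sin_cerrar := by
  intro linea _
  unfold Spec_detectar_string_sin_cerrar
  exact pvPorts_agree linea
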